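-- pv_equiv track=rewrite | github.com/karmkung/my-lotto-silly | src/smart_generator.py | analyze_position_weights
-- ===== SOURCE A (Python) =====
-- def analyze_position_weights(raw_numbers):
--     if not raw_numbers: return []
--     digit_len = len(str(raw_numbers[0]))
--     position_stats = [ {d: 0 for d in range(10)} for _ in range(digit_len) ]
--
--     for num_str in raw_numbers:
--         num_str = str(num_str).strip()
--         if len(num_str) != digit_len or not num_str.isdigit(): continue
--         for i in range(digit_len):
--             position_stats[i][int(num_str[i])] += 1
--
--     weights_per_position = []
--     for i in range(digit_len):
--         weights_per_position.append([position_stats[i][d] for d in range(10)])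
--     return weights_per_position
-- ===== SOURCE B (Python) =====
-- def analyze_position_weights(raw_numbers):
--     if not raw_numbers:
--         return []
--     digit_len = len(str(raw_numbers[0]))
--     valid = [s for s in (str(n).strip() for n in raw_numbers)
--              if len(s) == digit_len and s.isdigit()]
--     return [[[s[i] for s in valid].count(str(d)) for d in range(10)]
--             for i in range(digit_len)]
-- ===== Notes on version B (the rewrite author's own statement) =====
-- stated objective: alternative
-- what changed: Replaces the row-outer loop mutating a list of per-position digit dicts with a one-shot filter of valid digit strings followed by column-wise counting (count of each digit per position), no dicts and no in-place accumulation.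
import Mathlib
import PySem

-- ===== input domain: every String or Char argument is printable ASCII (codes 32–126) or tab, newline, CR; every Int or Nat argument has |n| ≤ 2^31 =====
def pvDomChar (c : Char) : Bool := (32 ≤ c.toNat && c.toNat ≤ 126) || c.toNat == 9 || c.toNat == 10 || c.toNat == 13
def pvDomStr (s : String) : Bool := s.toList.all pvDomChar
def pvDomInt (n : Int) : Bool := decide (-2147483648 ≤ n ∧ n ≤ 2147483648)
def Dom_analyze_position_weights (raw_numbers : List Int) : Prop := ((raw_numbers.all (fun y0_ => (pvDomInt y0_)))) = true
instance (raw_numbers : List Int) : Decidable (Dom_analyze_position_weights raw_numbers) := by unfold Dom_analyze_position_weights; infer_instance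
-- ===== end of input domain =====

-- B replaces A's row-outer accumulation into a list of per-position digit dicts by filtering the
-- valid digit strings once and counting each digit column-wise; equal output, no speed claim.

-- ===== PORT A =====
-- {d: 0 for d in range(10)}
def pvD0 : PySem.Dict Int Int :=
  PySem.Dict.ofList ((List.range 10).map (fun d => ((d : Int), (0 : Int))))

-- one iteration of A's 'for num_str in raw_numbers' loop over the list of dicts.
-- 'int(num_str[i])' on the digit char c is c.toNat - 48 (exact: the guard ensures c is an ASCII digit);
-- 'position_stats[i][k] += 1' is Dict.modify at the existing key k (the dict is seeded with keys 0..9,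
-- and k ∈ 0..9 by the isdigit guard, so Python's d[k] += 1 never raises and equals modify).
def pvStepA (digit_len : Nat) (st : List (PySem.Dict Int Int)) (num : Int) :
    List (PySem.Dict Int Int) :=
  let s := PySem.Chars.strip (PySem.Int.toChars num)
  if s.length == digit_len && PySem.Chars.strIsdigit s then
    (List.range digit_len).foldl
      (fun st i =>
        st.set i ((st.getD i PySem.Dict.empty).modify (((s.getD i ' ').toNat : Int) - 48) 0 (· + 1)))
      st
  else st

def analyze_position_weights (raw_numbers : List Int) : List (List Int) :=
  match raw_numbers with
  | [] => []
  | first :: _ =>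
    let digit_len := (PySem.Int.toChars first).length
    let position_stats := raw_numbers.foldl (pvStepA digit_len)
        ((List.range digit_len).map (fun _ => pvD0))
    (List.range digit_len).foldl
      (fun acc i =>
        acc ++ [(List.range 10).map (fun (d : Nat) => (position_stats.getD i PySem.Dict.empty).getD (d : Int) 0)])
      []

-- ===== PORT B =====
-- s[i] is s.getD i ' ' (i < digit_len = s.length for every valid s); 'str(d)' for d in range(10)
-- is the single digit char Char.ofNat (48 + d).
def analyze_position_weights_alt (raw_numbers : List Int) : List (List Int) :=
  match raw_numbers with
  | [] => []
  | first :: _ =>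
    let digit_len := (PySem.Int.toChars first).length
    let valid := (raw_numbers.map (fun n => PySem.Chars.strip (PySem.Int.toChars n))).filter
        (fun s => s.length == digit_len && PySem.Chars.strIsdigit s)
    (List.range digit_len).map (fun i =>
      (List.range 10).map (fun d =>
        ((valid.map (fun s => s.getD i ' ')).count (Char.ofNat (48 + d)) : Int)))

-- ===== PRECONDITION & SPEC =====
def Spec_analyze_position_weights (raw_numbers : List Int) (out : List (List Int)) : Prop := out = analyze_position_weights_alt raw_numbers
instance (raw_numbers : List Int) (out : List (List Int)) : Decidable (Spec_analyze_position_weights raw_numbers out) := by unfold Spec_analyze_position_weights; infer_instance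

-- ===== CLAIM (what is proved, stated in full; the proofs are below) =====
def Claim_equal_analyze_position_weights : Prop := ∀ (raw_numbers : List Int), Dom_analyze_position_weights raw_numbers → Spec_analyze_position_weights raw_numbers (analyze_position_weights raw_numbers)

-- ===== LEMMAS AND PROOFS =====

-- proof-only helpers: the stripped string of a number, A's validity guard, A's dict key at position j
def pvS (n : Int) : List Char := PySem.Chars.strip (PySem.Int.toChars n)
def pvValid (L : Nat) (n : Int) : Bool := (pvS n).length == L && PySem.Chars.strIsdigit (pvS n)
def pvKey (n : Int) (j : Nat) : Int := (((pvS n).getD j ' ').toNat : Int) - 48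

theorem pvD0_getD (d : Int) : pvD0.getD d 0 = 0 := by
  have h : pvD0 = PySem.Dict.mk [(0, 0), (1, 0), (2, 0), (3, 0), (4, 0), (5, 0), (6, 0), (7, 0), (8, 0), (9, 0)] := by decide
  rw [h, PySem.Dict.getD_eq_get?_getD]
  simp only [PySem.Dict.get?_mk_cons]
  split_ifs <;> rfl

theorem pv_len_foldl_set (g : Nat → PySem.Dict Int Int → PySem.Dict Int Int) (l : List Nat) :
    ∀ st : List (PySem.Dict Int Int),
    (l.foldl (fun st i => st.set i (g i (st.getD i PySem.Dict.empty))) st).length = st.length := by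
  induction l with
  | nil => intro st; rfl
  | cons i t ih => intro st; simp only [List.foldl_cons]; rw [ih]; exact List.length_set ..

theorem pv_inner_getD (g : Nat → PySem.Dict Int Int → PySem.Dict Int Int) :
    ∀ (l : List Nat) (st : List (PySem.Dict Int Int)), l.Nodup → (∀ i ∈ l, i < st.length) → ∀ j : Nat,
    (l.foldl (fun st i => st.set i (g i (st.getD i PySem.Dict.empty))) st).getD j PySem.Dict.empty
      = if j ∈ l then g j (st.getD j PySem.Dict.empty) else st.getD j PySem.Dict.empty := by
  intro l
  induction l with
  | nil => intro st _ _ j; simp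
  | cons i t ih =>
    intro st hnd hlt j
    simp only [List.foldl_cons]
    rw [ih _ (List.nodup_cons.mp hnd).2
        (fun k hk => by rw [List.length_set]; exact hlt k (List.mem_cons_of_mem _ hk))]
    have hi : i < st.length := hlt i List.mem_cons_self
    by_cases hji : j = i
    · subst hji
      have hjt : j ∉ t := (List.nodup_cons.mp hnd).1
      simp [hjt, List.getD_eq_getElem?_getD, hi]
    · have hset : (st.set i (g i (st.getD i PySem.Dict.empty))).getD j PySem.Dict.empty
          = st.getD j PySem.Dict.empty := by
        simp [List.getD_eq_getElem?_getD, Ne.symm hji]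
      rw [hset]
      by_cases hjt : j ∈ t <;> simp [hjt, hji]

theorem pvStepA_length (L : Nat) (st : List (PySem.Dict Int Int)) (n : Int) :
    (pvStepA L st n).length = st.length := by
  simp only [pvStepA]
  split
  · exact pv_len_foldl_set
      (fun i dd => dd.modify ((((PySem.Chars.strip (PySem.Int.toChars n)).getD i ' ').toNat : Int) - 48) 0 (· + 1)) _ _
  · rfl

theorem pvStepA_valid (L : Nat) (st : List (PySem.Dict Int Int)) (n : Int)
    (hlen : st.length = L) (hv : pvValid L n = true) (j : Nat) (hj : j < L) :
    (pvStepA L st n).getD j PySem.Dict.empty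
      = (st.getD j PySem.Dict.empty).modify (pvKey n j) 0 (· + 1) := by
  simp only [pvStepA]
  rw [if_pos (show ((PySem.Chars.strip (PySem.Int.toChars n)).length == L
        && PySem.Chars.strIsdigit (PySem.Chars.strip (PySem.Int.toChars n))) = true
      by simpa [pvValid, pvS] using hv)]
  rw [pv_inner_getD
      (fun i dd => dd.modify ((((PySem.Chars.strip (PySem.Int.toChars n)).getD i ' ').toNat : Int) - 48) 0 (· + 1))
      (List.range L) st List.nodup_range
      (fun k hk => by rw [hlen]; exact List.mem_range.mp hk) j]
  rw [if_pos (List.mem_range.mpr hj)]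
  rfl

theorem pvStepA_invalid (L : Nat) (st : List (PySem.Dict Int Int)) (n : Int)
    (hv : pvValid L n = false) : pvStepA L st n = st := by
  simp only [pvStepA]
  rw [if_neg (show ¬ ((PySem.Chars.strip (PySem.Int.toChars n)).length == L
        && PySem.Chars.strIsdigit (PySem.Chars.strip (PySem.Int.toChars n))) = true
      by simp only [pvValid, pvS] at hv; simp [hv])]

theorem pv_outer (L : Nat) :
    ∀ (raw : List Int) (st : List (PySem.Dict Int Int)), st.length = L → ∀ j : Nat, j < L → ∀ d : Int,
    ((raw.foldl (pvStepA L) st).getD j PySem.Dict.empty).getD d 0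
      = (st.getD j PySem.Dict.empty).getD d 0
        + (raw.countP (fun n => pvValid L n && (pvKey n j == d)) : Int) := by
  intro raw
  induction raw with
  | nil => intro st _ j _ d; simp
  | cons n t ih =>
    intro st hlen j hj d
    simp only [List.foldl_cons, List.countP_cons]
    rw [ih (pvStepA L st n) (by rw [pvStepA_length, hlen]) j hj d]
    by_cases hv : pvValid L n = true
    · rw [pvStepA_valid L st n hlen hv j hj, PySem.Dict.getD_modify]
      by_cases hd : d = pvKey n j
      · subst hd
        have hp : (pvValid L n && (pvKey n j == pvKey n j)) = true := by simp [hv]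
        rw [if_pos rfl, hp]
        simp
        ring
      · have hd' : pvKey n j ≠ d := fun h => hd h.symm
        have hp : (pvValid L n && (pvKey n j == d)) = false := by simp [hd']
        rw [if_neg hd, hp]
        simp
    · rw [pvStepA_invalid L st n (Bool.eq_false_iff.mpr hv)]
      simp [Bool.eq_false_iff.mpr hv]

-- the two per-element predicates agree: int(s[j]) == d  iff  s[j] == str(d), for valid s
theorem pv_pred_eq (L j d : Nat) (hd : d < 10) (hj : j < L) (n : Int) :
    (pvValid L n && (pvKey n j == (d : Int)))
      = (((pvS n).getD j ' ' == Char.ofNat (48 + d)) && pvValid L n) := by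
  by_cases hv : pvValid L n = true
  · rw [hv, Bool.true_and, Bool.and_true]
    obtain ⟨hlen, hdig⟩ : (pvS n).length = L ∧ PySem.Chars.strIsdigit (pvS n) = true := by
      simpa [pvValid] using hv
    have hjlen : j < (pvS n).length := by rw [hlen]; exact hj
    have hmem : (pvS n).getD j ' ' ∈ pvS n := by
      rw [List.getD_eq_getElem?_getD, List.getElem?_eq_getElem hjlen]
      exact List.getElem_mem hjlen
    have hc : PySem.Chars.isdigit ((pvS n).getD j ' ') = true := by
      obtain ⟨-, hall⟩ : ¬(pvS n).isEmpty = true ∧ (pvS n).all PySem.Chars.isdigit = true := by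
        simpa [PySem.Chars.strIsdigit] using hdig
      exact List.all_eq_true.mp hall _ hmem
    set c := (pvS n).getD j ' ' with hcdef
    have hcr : 48 ≤ c.toNat ∧ c.toNat ≤ 57 := by
      simp only [PySem.Chars.isdigit, Char.le_def, Bool.and_eq_true, decide_eq_true_eq] at hc
      exact hc
    have hvalid : (48 + d).isValidChar := Or.inl (by omega)
    have key_iff : pvKey n j = (d : Int) ↔ c = Char.ofNat (48 + d) := by
      constructor
      · intro habs
        have hct : c.toNat = 48 + d := by
          simp only [pvKey, ← hcdef] at habs
          omega
        rw [← hct, Char.ofNat_toNat]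
      · intro heq
        have hct : c.toNat = 48 + d := by rw [heq, Char.toNat_ofNat]; simp [hvalid]
        simp only [pvKey, ← hcdef, hct]
        push_cast
        ring
    rw [Bool.eq_iff_iff]
    simp only [beq_iff_eq]
    exact key_iff
  · rw [Bool.eq_false_iff.mpr hv]
    simp

-- ===== VERDICT (by name: the statement is the Claim_ definition above) =====
theorem analyze_position_weights_spec : Claim_equal_analyze_position_weights := by
  intro raw _
  unfold Spec_analyze_position_weights
  match raw with
  | [] => rfl
  | first :: rest =>
    simp only [analyze_position_weights, analyze_position_weights_alt]
    rw [PySem.List.foldl_append_singleton_eq_map, List.nil_append]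
    apply List.map_congr_left
    intro i hi
    have hiL : i < (PySem.Int.toChars first).length := List.mem_range.mp hi
    apply List.map_congr_left
    intro d hd
    have hd10 : d < 10 := List.mem_range.mp hd
    rw [pv_outer ((PySem.Int.toChars first).length) (first :: rest) _ (by simp) i hiL (d : Int)]
    have hinit : ((List.range (PySem.Int.toChars first).length).map (fun _ => pvD0)).getD i PySem.Dict.empty = pvD0 := by
      simp [List.getD_eq_getElem?_getD, hiL]
    rw [hinit, pvD0_getD, zero_add]
    rw [List.count_eq_countP, List.countP_map, List.countP_filter, List.countP_map]
    congr 1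
    apply List.countP_congr
    intro n _
    simp only [Function.comp_def]
    rw [pv_pred_eq ((PySem.Int.toChars first).length) i d hd10 hiL n]
    simp only [pvValid, pvS]
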